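-- pv_equiv track=rewrite | github.com/allexp1/Sales-Filter | app.py | analyze_geographic_intelligence
-- ===== SOURCE A (Python) =====
-- def analyze_geographic_intelligence(domain):
--     """Analyze geographic signals from domain"""
--     if not domain:
--         return 0, "Missing domain"
--
--     score = 0
--     reasons = []
--
--     # High-value geographic TLDs for telecom
--     premium_geo_tlds = {
--         '.de': ('Germany', 15), '.nl': ('Netherlands', 15), '.ch': ('Switzerland', 15),
--         '.at': ('Austria', 15), '.se': ('Sweden', 12), '.no': ('Norway', 12),
--         '.dk': ('Denmark', 12), '.fi': ('Finland', 12)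
--     }
--
--     good_geo_tlds = {
--         '.sg': ('Singapore', 10), '.hk': ('Hong Kong', 10), '.au': ('Australia', 10),
--         '.ca': ('Canada', 12), '.uk': ('United Kingdom', 12), '.fr': ('France', 12),
--         '.jp': ('Japan', 8), '.kr': ('South Korea', 8)
--     }
--
--     restricted_geo_tlds = {
--         '.cn': ('China', -20), '.ru': ('Russia', -50), '.by': ('Belarus', -30),
--         '.ir': ('Iran', -40), '.kp': ('North Korea', -50)
--     }
--
--     domain_lower = domain.lower()
--
--     # Check premium geographic TLDs
--     for tld, (country, points) in premium_geo_tlds.items():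
--         if domain_lower.endswith(tld):
--             score += points
--             reasons.append(f"{country} domain - telecom-friendly ({points:+d})")
--             break
--
--     # Check good geographic TLDs
--     for tld, (country, points) in good_geo_tlds.items():
--         if domain_lower.endswith(tld):
--             score += points
--             reasons.append(f"{country} domain - business-friendly ({points:+d})")
--             break
--
--     # Check restricted geographic TLDs
--     for tld, (country, points) in restricted_geo_tlds.items():
--         if domain_lower.endswith(tld):
--             score += points
--             reasons.append(f"{country} domain - restricted/sanctioned ({points:+d})")
--             break
--
--     return score, ", ".join(reasons)
-- ===== SOURCE B (Python) =====
-- GEO_TABLE = {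
--     '.de': ('Germany', 15, 'telecom-friendly'),
--     '.nl': ('Netherlands', 15, 'telecom-friendly'),
--     '.ch': ('Switzerland', 15, 'telecom-friendly'),
--     '.at': ('Austria', 15, 'telecom-friendly'),
--     '.se': ('Sweden', 12, 'telecom-friendly'),
--     '.no': ('Norway', 12, 'telecom-friendly'),
--     '.dk': ('Denmark', 12, 'telecom-friendly'),
--     '.fi': ('Finland', 12, 'telecom-friendly'),
--     '.sg': ('Singapore', 10, 'business-friendly'),
--     '.hk': ('Hong Kong', 10, 'business-friendly'),
--     '.au': ('Australia', 10, 'business-friendly'),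
--     '.ca': ('Canada', 12, 'business-friendly'),
--     '.uk': ('United Kingdom', 12, 'business-friendly'),
--     '.fr': ('France', 12, 'business-friendly'),
--     '.jp': ('Japan', 8, 'business-friendly'),
--     '.kr': ('South Korea', 8, 'business-friendly'),
--     '.cn': ('China', -20, 'restricted/sanctioned'),
--     '.ru': ('Russia', -50, 'restricted/sanctioned'),
--     '.by': ('Belarus', -30, 'restricted/sanctioned'),
--     '.ir': ('Iran', -40, 'restricted/sanctioned'),
--     '.kp': ('North Korea', -50, 'restricted/sanctioned'),
-- }
--
--
-- def analyze_geographic_intelligence(domain):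
--     """Analyze geographic signals from domain"""
--     if not domain:
--         return 0, "Missing domain"
--     info = GEO_TABLE.get(domain.lower()[-3:])
--     if info is None:
--         return 0, ""
--     country, points, phrase = info
--     return points, f"{country} domain - {phrase} ({points:+d})"
-- ===== Notes on version B (the rewrite author's own statement) =====
-- stated objective: simpler
-- what changed: Replaces A's three sequential endswith-scan loops over three dicts by a single precomputed table keyed on the last three characters of the lowered domain, looked up once.
import Mathlib
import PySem

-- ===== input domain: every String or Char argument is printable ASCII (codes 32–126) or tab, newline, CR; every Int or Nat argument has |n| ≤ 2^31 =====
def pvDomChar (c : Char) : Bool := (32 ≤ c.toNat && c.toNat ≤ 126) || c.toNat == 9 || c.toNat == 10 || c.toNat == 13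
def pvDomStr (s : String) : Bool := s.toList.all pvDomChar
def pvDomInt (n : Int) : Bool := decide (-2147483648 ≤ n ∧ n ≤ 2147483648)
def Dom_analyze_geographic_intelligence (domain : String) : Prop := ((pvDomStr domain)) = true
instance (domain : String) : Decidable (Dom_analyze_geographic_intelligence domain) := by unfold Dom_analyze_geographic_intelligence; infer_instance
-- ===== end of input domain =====

-- B replaces A's three sequential endswith scans by one precomputed table keyed on the
-- last three characters of the lowered domain (objective: simpler; same exact results).

-- f"...({points:+d})" — the sign-forcing integer format shared by both f-strings
def pvPlusd (n : Int) : List Char :=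
  if 0 ≤ n then '+' :: PySem.Int.toChars n else PySem.Int.toChars n

-- f"{country} domain - {phrase} ({points:+d})"
def pvReason (country phrase : List Char) (pts : Int) : List Char :=
  country ++ " domain - ".toList ++ phrase ++ " (".toList ++ pvPlusd pts ++ ")".toList

-- ===== PORT A =====
def pvPremium : List (List Char × List Char × Int) :=
  [(['.', 'd', 'e'], "Germany".toList, 15), (['.', 'n', 'l'], "Netherlands".toList, 15),
   (['.', 'c', 'h'], "Switzerland".toList, 15), (['.', 'a', 't'], "Austria".toList, 15),
   (['.', 's', 'e'], "Sweden".toList, 12), (['.', 'n', 'o'], "Norway".toList, 12),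
   (['.', 'd', 'k'], "Denmark".toList, 12), (['.', 'f', 'i'], "Finland".toList, 12)]

def pvGood : List (List Char × List Char × Int) :=
  [(['.', 's', 'g'], "Singapore".toList, 10), (['.', 'h', 'k'], "Hong Kong".toList, 10),
   (['.', 'a', 'u'], "Australia".toList, 10), (['.', 'c', 'a'], "Canada".toList, 12),
   (['.', 'u', 'k'], "United Kingdom".toList, 12), (['.', 'f', 'r'], "France".toList, 12),
   (['.', 'j', 'p'], "Japan".toList, 8), (['.', 'k', 'r'], "South Korea".toList, 8)]

def pvRestricted : List (List Char × List Char × Int) :=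
  [(['.', 'c', 'n'], "China".toList, -20), (['.', 'r', 'u'], "Russia".toList, -50),
   (['.', 'b', 'y'], "Belarus".toList, -30), (['.', 'i', 'r'], "Iran".toList, -40),
   (['.', 'k', 'p'], "North Korea".toList, -50)]

-- one 'for tld, (country, points) in … if domain_lower.endswith(tld): …; break' loop
def pvScan (dl : List Char) (tlds : List (List Char × List Char × Int)) (phrase : List Char) :
    Int × List (List Char) :=
  match tlds with
  | [] => (0, [])
  | (tld, country, pts) :: rest =>
    if PySem.Chars.endswith dl tld then (pts, [pvReason country phrase pts])
    else pvScan dl rest phrase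

def analyze_geographic_intelligence (domain : String) : Int × String :=
  if domain.toList = [] then (0, "Missing domain")
  else
    let dl := PySem.Chars.lower domain.toList
    let p := pvScan dl pvPremium "telecom-friendly".toList
    let g := pvScan dl pvGood "business-friendly".toList
    let r := pvScan dl pvRestricted "restricted/sanctioned".toList
    (p.1 + g.1 + r.1, String.mk (PySem.Chars.join ", ".toList (p.2 ++ g.2 ++ r.2)))

-- ===== PORT B =====
def pvGeoTable : PySem.Dict (List Char) (List Char × Int × List Char) :=
  PySem.Dict.mk
  [(['.', 'd', 'e'], ("Germany".toList, 15, "telecom-friendly".toList)),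
   (['.', 'n', 'l'], ("Netherlands".toList, 15, "telecom-friendly".toList)),
   (['.', 'c', 'h'], ("Switzerland".toList, 15, "telecom-friendly".toList)),
   (['.', 'a', 't'], ("Austria".toList, 15, "telecom-friendly".toList)),
   (['.', 's', 'e'], ("Sweden".toList, 12, "telecom-friendly".toList)),
   (['.', 'n', 'o'], ("Norway".toList, 12, "telecom-friendly".toList)),
   (['.', 'd', 'k'], ("Denmark".toList, 12, "telecom-friendly".toList)),
   (['.', 'f', 'i'], ("Finland".toList, 12, "telecom-friendly".toList)),
   (['.', 's', 'g'], ("Singapore".toList, 10, "business-friendly".toList)),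
   (['.', 'h', 'k'], ("Hong Kong".toList, 10, "business-friendly".toList)),
   (['.', 'a', 'u'], ("Australia".toList, 10, "business-friendly".toList)),
   (['.', 'c', 'a'], ("Canada".toList, 12, "business-friendly".toList)),
   (['.', 'u', 'k'], ("United Kingdom".toList, 12, "business-friendly".toList)),
   (['.', 'f', 'r'], ("France".toList, 12, "business-friendly".toList)),
   (['.', 'j', 'p'], ("Japan".toList, 8, "business-friendly".toList)),
   (['.', 'k', 'r'], ("South Korea".toList, 8, "business-friendly".toList)),
   (['.', 'c', 'n'], ("China".toList, -20, "restricted/sanctioned".toList)),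
   (['.', 'r', 'u'], ("Russia".toList, -50, "restricted/sanctioned".toList)),
   (['.', 'b', 'y'], ("Belarus".toList, -30, "restricted/sanctioned".toList)),
   (['.', 'i', 'r'], ("Iran".toList, -40, "restricted/sanctioned".toList)),
   (['.', 'k', 'p'], ("North Korea".toList, -50, "restricted/sanctioned".toList))]

def analyze_geographic_intelligence_alt (domain : String) : Int × String :=
  if domain.toList = [] then (0, "Missing domain")
  else
    match PySem.Dict.get? pvGeoTable
        (PySem.List.slice (PySem.Chars.lower domain.toList) (some (-3)) none) with
    | none => (0, "")
    | some (country, pts, phrase) => (pts, String.mk (pvReason country phrase pts))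

-- ===== PRECONDITION & SPEC =====
def Spec_analyze_geographic_intelligence (domain : String) (out : Int × String) : Prop := out = analyze_geographic_intelligence_alt domain
instance (domain : String) (out : Int × String) : Decidable (Spec_analyze_geographic_intelligence domain out) := by unfold Spec_analyze_geographic_intelligence; infer_instance

-- ===== CLAIM (what is proved, stated in full; the proofs are below) =====
def Claim_equal_analyze_geographic_intelligence : Prop := ∀ (domain : String), Dom_analyze_geographic_intelligence domain → Spec_analyze_geographic_intelligence domain (analyze_geographic_intelligence domain)

-- ===== LEMMAS AND PROOFS =====

-- ends-with a 3-character suffix ↔ the last three characters are that suffix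
theorem pvEndswith3 (dl : List Char) (a b c : Char) :
    PySem.Chars.endswith dl [a, b, c] = decide (dl.drop (dl.length - 3) = [a, b, c]) := by
  have hiff : PySem.Chars.endswith dl [a, b, c] = true ↔ dl.drop (dl.length - 3) = [a, b, c] := by
    rw [PySem.Chars.endswith_iff, List.suffix_iff_eq_drop, List.length_cons, List.length_cons,
      List.length_cons, List.length_nil, eq_comm]
  simp only [← hiff]
  cases PySem.Chars.endswith dl [a, b, c] <;> simp

theorem analyze_geographic_intelligence_spec : Claim_equal_analyze_geographic_intelligence := by
  intro domain _
  show _ = _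
  unfold analyze_geographic_intelligence analyze_geographic_intelligence_alt
  by_cases h0 : domain.toList = []
  · simp [h0]
  · simp only [h0, if_false]
    rw [PySem.List.slice_from_neg_ofNat (PySem.Chars.lower domain.toList) 3 (by omega)]
    generalize PySem.Chars.lower domain.toList = dl
    simp only [pvScan, pvPremium, pvGood, pvRestricted,
      pvEndswith3]
    generalize dl.drop (dl.length - 3) = t
    by_cases h1 : t = ['.', 'd', 'e']; · subst h1; decide
    by_cases h2 : t = ['.', 'n', 'l']; · subst h2; decide
    by_cases h3 : t = ['.', 'c', 'h']; · subst h3; decide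
    by_cases h4 : t = ['.', 'a', 't']; · subst h4; decide
    by_cases h5 : t = ['.', 's', 'e']; · subst h5; decide
    by_cases h6 : t = ['.', 'n', 'o']; · subst h6; decide
    by_cases h7 : t = ['.', 'd', 'k']; · subst h7; decide
    by_cases h8 : t = ['.', 'f', 'i']; · subst h8; decide
    by_cases h9 : t = ['.', 's', 'g']; · subst h9; decide
    by_cases h10 : t = ['.', 'h', 'k']; · subst h10; decide
    by_cases h11 : t = ['.', 'a', 'u']; · subst h11; decide
    by_cases h12 : t = ['.', 'c', 'a']; · subst h12; decide
    by_cases h13 : t = ['.', 'u', 'k']; · subst h13; decide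
    by_cases h14 : t = ['.', 'f', 'r']; · subst h14; decide
    by_cases h15 : t = ['.', 'j', 'p']; · subst h15; decide
    by_cases h16 : t = ['.', 'k', 'r']; · subst h16; decide
    by_cases h17 : t = ['.', 'c', 'n']; · subst h17; decide
    by_cases h18 : t = ['.', 'r', 'u']; · subst h18; decide
    by_cases h19 : t = ['.', 'b', 'y']; · subst h19; decide
    by_cases h20 : t = ['.', 'i', 'r']; · subst h20; decide
    by_cases h21 : t = ['.', 'k', 'p']; · subst h21; decide
    simp [pvGeoTable, PySem.Chars.join,
      h1, h2, h3, h4, h5, h6, h7, h8, h9, h10, h11, h12, h13, h14, h15, h16,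
      h17, h18, h19, h20, h21, Ne.symm, PySem.Dict.get?, List.intercalate]
    rfl
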